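-- pv_equiv track=rewrite | github.com/LuisGC/advent-of-code | 2024/day-22/main.py | differences_to_price
-- ===== SOURCE A (Python) =====
-- def mix(secret: int, number: int) -> int:
--     return secret ^ number
--
-- def prune(secret: int) -> int:
--     return secret % 16777216
--
-- def next_secret(secret: int) -> int:
--     secret = prune(mix(secret, secret * 64))
--     secret = prune(mix(secret, secret // 32))
--     secret = prune(mix(secret, secret * 2048))
--     return secret
--
-- def get_prices_sequence(secret: int, length: int) -> list[int]:
--     return [value % 10 for value in get_sequence(secret, length)]
--
-- def get_sequence(secret: int, length: int) -> list[int]: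
--     return [secret] + [secret := next_secret(secret) for _ in range(length - 1)]
--
-- def get_differences(sequence: list[int]) -> list[int]:
--     return [sequence[i + 1] - sequence[i] for i in range(len(sequence) - 1)]
--
-- def differences_to_price(secret: int, length: int) -> dict[tuple[int, ...], int]:
--     sequence: list[int] = get_prices_sequence(secret, length)
--     differences: list[int] = get_differences(sequence)
--     answer: dict[tuple[int, ...], int] = {}
--     diffs = tuple[int, ...]
--     for i in range(4, len(sequence)):
--         diffs = tuple(differences[i-4:i])
--         if not diffs in answer:
--             answer[diffs] = sequence[i]
--
--     return answer
-- ===== SOURCE B (Python) =====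
-- def mix(secret: int, number: int) -> int:
--     return secret ^ number
--
-- def prune(secret: int) -> int:
--     return secret % 16777216
--
-- def next_secret(secret: int) -> int:
--     secret = prune(mix(secret, secret * 64))
--     secret = prune(mix(secret, secret // 32))
--     secret = prune(mix(secret, secret * 2048))
--     return secret
--
-- def differences_to_price(secret: int, length: int) -> dict[tuple[int, ...], int]:
--     answer: dict[tuple[int, ...], int] = {}
--     s = secret
--     prev = s % 10
--     window: tuple[int, ...] = ()
--     for _ in range(length - 1):
--         s = next_secret(s)
--         price = s % 10
--         window = (window + (price - prev,))[-4:]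
--         prev = price
--         if len(window) == 4:
--             answer.setdefault(window, price)
--     return answer
-- ===== Notes on version B (the rewrite author's own statement) =====
-- stated objective: alternative
-- what changed: B fuses the three list-building passes (secret sequence, prices, differences) and the slicing loop into a single streaming pass that keeps only the previous price and a rolling 4-tuple of differences, inserting first-seen windows via setdefault.
import Mathlib
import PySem

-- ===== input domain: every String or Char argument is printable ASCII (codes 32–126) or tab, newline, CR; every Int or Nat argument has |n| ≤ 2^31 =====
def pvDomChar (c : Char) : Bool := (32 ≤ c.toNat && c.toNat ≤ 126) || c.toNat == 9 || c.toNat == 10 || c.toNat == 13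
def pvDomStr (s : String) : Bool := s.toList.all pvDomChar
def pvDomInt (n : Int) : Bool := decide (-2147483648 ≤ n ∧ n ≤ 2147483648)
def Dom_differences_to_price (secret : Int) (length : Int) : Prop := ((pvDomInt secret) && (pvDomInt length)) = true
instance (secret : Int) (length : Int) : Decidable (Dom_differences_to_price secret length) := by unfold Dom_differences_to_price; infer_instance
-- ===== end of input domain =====

-- B fuses A's four passes (secret sequence, prices, differences, slicing loop) into one
-- streaming pass with a rolling window of the last four differences (objective: alternative).

-- ===== PORT A =====
def pvMix (secret number : Int) : Int := PySem.Int.bxor secret number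

def pvPrune (secret : Int) : Int := PySem.Int.mod secret 16777216

def pvNextSecret (secret : Int) : Int :=
  let s1 := pvPrune (pvMix secret (secret * 64))
  let s2 := pvPrune (pvMix s1 (PySem.Int.floordiv s1 32))
  pvPrune (pvMix s2 (s2 * 2048))

-- [secret] + [secret := next_secret(secret) for _ in range(length - 1)]
def pvGetSequence (secret : Int) (length : Int) : List Int :=
  let st := (PySem.List.pyRange 0 (length - 1) 1).foldl
    (fun (st : List Int × Int) _ => let s' := pvNextSecret st.2; (st.1 ++ [s'], s'))
    ([], secret)
  secret :: st.1

def pvGetPricesSequence (secret : Int) (length : Int) : List Int :=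
  (pvGetSequence secret length).map (fun v => PySem.Int.mod v 10)

def pvGetDifferences (sequence : List Int) : List Int :=
  (PySem.List.pyRange 0 ((sequence.length : Int) - 1) 1).map
    (fun i => PySem.List.pyGetD sequence (i + 1) 0 - PySem.List.pyGetD sequence i 0)

def differences_to_price (secret : Int) (length : Int) : List (List Int × Int) :=
  let sequence := pvGetPricesSequence secret length
  let differences := pvGetDifferences sequence
  let answer := (PySem.List.pyRange 4 (sequence.length : Int) 1).foldl
    (fun (d : PySem.Dict (List Int) Int) i =>
      let diffs := PySem.List.slice differences (some (i - 4)) (some i)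
      if d.contains diffs then d else d.insert diffs (PySem.List.pyGetD sequence i 0))
    PySem.Dict.empty
  answer.items

-- ===== PORT B =====
-- the streaming loop: remaining iteration count, current secret, previous price, rolling window, answer
def pvAltLoop : Nat → Int → Int → List Int → PySem.Dict (List Int) Int → PySem.Dict (List Int) Int
  | 0, _, _, _, ans => ans
  | r + 1, s, prev, window, ans =>
    let s' := pvNextSecret s
    let price := PySem.Int.mod s' 10
    let w := PySem.List.slice (window ++ [price - prev]) (some (-4)) none
    let ans' := if w.length == 4 then ans.setdefault w price else ans
    pvAltLoop r s' price w ans'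

def differences_to_price_alt (secret : Int) (length : Int) : List (List Int × Int) :=
  (pvAltLoop (length - 1).toNat secret (PySem.Int.mod secret 10) [] PySem.Dict.empty).items

-- ===== PRECONDITION & SPEC =====
def Spec_differences_to_price (secret : Int) (length : Int) (out : List (List Int × Int)) : Prop := out = differences_to_price_alt secret length
instance (secret : Int) (length : Int) (out : List (List Int × Int)) : Decidable (Spec_differences_to_price secret length out) := by unfold Spec_differences_to_price; infer_instance

-- ===== CLAIM (what is proved, stated in full; the proofs are below) =====
def Claim_equal_differences_to_price : Prop := ∀ (secret : Int) (length : Int), Dom_differences_to_price secret length → Spec_differences_to_price secret length (differences_to_price secret length)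

-- ===== LEMMAS AND PROOFS =====

-- iterated next_secret, recursing on the front
def pvIter : Nat → Int → Int
  | 0, s => s
  | k + 1, s => pvIter k (pvNextSecret s)

lemma pvIter_succ_right (k : Nat) (s : Int) : pvIter (k + 1) s = pvNextSecret (pvIter k s) := by
  induction k generalizing s with
  | zero => rfl
  | succ k ih => simpa [pvIter] using ih (pvNextSecret s)

-- the k-th price and the k-th difference of prices
def pvP (secret : Int) (k : Nat) : Int := PySem.Int.mod (pvIter k secret) 10
def pvD (secret : Int) (k : Nat) : Int := pvP secret (k + 1) - pvP secret k

-- the common first-seen insertion step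
def pvStep (d : PySem.Dict (List Int) Int) (kv : List Int × Int) : PySem.Dict (List Int) Int :=
  d.setdefault kv.1 kv.2

lemma pvSeq_fold (l : List Int) (acc : List Int) (s : Int) :
    (l.foldl (fun (st : List Int × Int) _ => let s' := pvNextSecret st.2; (st.1 ++ [s'], s')) (acc, s))
      = (acc ++ (List.range l.length).map (fun k => pvIter (k + 1) s), pvIter l.length s) := by
  induction l generalizing acc s with
  | nil => simp [pvIter]
  | cons x t ih =>
    simp only [List.foldl_cons, List.length_cons]
    rw [ih]
    simp only [Prod.mk.injEq]
    refine ⟨?_, by simp [pvIter]⟩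
    simp [List.range_succ_eq_map, List.map_map, Function.comp, pvIter]

lemma pvSeq_eq (secret length : Int) :
    pvGetSequence secret length
      = (List.range ((length - 1).toNat + 1)).map (fun k => pvIter k secret) := by
  unfold pvGetSequence
  rw [pvSeq_fold]
  simp [PySem.List.length_pyRange_one, List.range_succ_eq_map, List.map_map, Function.comp, pvIter]

lemma pvPrices_eq (secret length : Int) :
    pvGetPricesSequence secret length
      = (List.range ((length - 1).toNat + 1)).map (pvP secret) := by
  unfold pvGetPricesSequence
  rw [pvSeq_eq]
  simp [List.map_map, Function.comp, pvP]

lemma pvDiffs_eq (secret length : Int) :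
    pvGetDifferences (pvGetPricesSequence secret length)
      = (List.range (length - 1).toNat).map (pvD secret) := by
  unfold pvGetDifferences
  rw [pvPrices_eq]
  set n := (length - 1).toNat with hn
  have hlen : (((List.range (n + 1)).map (pvP secret)).length : Int) - 1 = ((n : Int)) := by
    simp
  rw [hlen, PySem.List.pyRange_zero_nat]
  rw [List.map_map]
  apply List.map_congr_left
  intro k hk
  simp only [List.mem_range] at hk
  simp only [Function.comp]
  have h1 : ((k : Int) + 1) = ((k + 1 : Nat) : Int) := by omega
  rw [h1, PySem.List.pyGetD_natCast, PySem.List.pyGetD_natCast]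
  rw [List.getD_eq_getElem _ _ (by simpa using by omega), List.getD_eq_getElem _ _ (by simpa using by omega)]
  simp [pvD]

lemma pvFilter_range' (n : Nat) :
    (List.range' 1 n).filter (fun k => 4 ≤ k) = List.range' 4 (n - 3) := by
  induction n with
  | zero => simp
  | succ n ih =>
    rw [List.range'_concat, List.filter_append, ih]
    by_cases h : 4 ≤ 1 + n
    · have h3 : n + 1 - 3 = (n - 3) + 1 := by omega
      rw [h3, List.range'_concat]
      simp only [List.filter_cons, List.filter_nil]
      have : (4 : Nat) + (n - 3) = 1 + n := by omega
      simp [h, this]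
    · have h3 : n + 1 - 3 = 0 := by omega
      have h4 : n - 3 = 0 := by omega
      simp [h3, h4, h]

lemma pvDrop_range' (m s n : Nat) : (List.range' s n).drop m = List.range' (s + m) (n - m) := by
  induction m generalizing s n with
  | zero => simp
  | succ m ih =>
    cases n with
    | zero => simp
    | succ n =>
      rw [List.range'_succ, List.drop_succ_cons, ih (s+1) n]
      congr 1 <;> omega

lemma pvWin_key (secret : Int) (j : Nat) (hj : 4 ≤ j) :
    ((List.range j).map (pvD secret)).drop (j - 4) = (List.range' (j - 4) 4).map (pvD secret) := by
  rw [← List.map_drop, List.range_eq_range', pvDrop_range']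
  have h1 : 0 + (j - 4) = j - 4 := by omega
  have h2 : j - (j - 4) = 4 := by omega
  rw [h1, h2]

lemma pvAltLoop_spec (secret : Int) (r j : Nat) (ans : PySem.Dict (List Int) Int) :
    pvAltLoop r (pvIter j secret) (pvP secret j)
        (((List.range j).map (pvD secret)).drop (j - 4)) ans
      = (((List.range' (j + 1) r).filter (fun k => 4 ≤ k)).map
          (fun k => ((List.range' (k - 4) 4).map (pvD secret), pvP secret k))).foldl pvStep ans := by
  induction r generalizing j ans with
  | zero => simp [pvAltLoop]
  | succ r ih =>
    have hs' : pvNextSecret (pvIter j secret) = pvIter (j + 1) secret :=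
      (pvIter_succ_right j secret).symm
    have hwin : ((List.range j).map (pvD secret)).drop (j - 4) ++ [pvD secret j]
        = ((List.range (j + 1)).map (pvD secret)).drop (j - 4) := by
      rw [List.range_succ, List.map_append,
        List.drop_append_of_le_length (by simp)]
      simp
    have hlen1 : (((List.range (j + 1)).map (pvD secret)).drop (j - 4)).length = j + 1 - (j - 4) := by
      simp
    have hw : PySem.List.slice (((List.range (j + 1)).map (pvD secret)).drop (j - 4)) (some (-4)) none
        = ((List.range (j + 1)).map (pvD secret)).drop (j + 1 - 4) := by
      rw [PySem.List.slice_from_neg_ofNat _ 4 (by norm_num), hlen1, List.drop_drop]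
      congr 1
      omega
    simp only [pvAltLoop]
    rw [hs']
    have hprice : PySem.Int.mod (pvIter (j + 1) secret) 10 = pvP secret (j + 1) := rfl
    have hdiff : pvP secret (j + 1) - pvP secret j = pvD secret j := rfl
    rw [hprice, hdiff, hwin, hw]
    have hcond : ((((List.range (j + 1)).map (pvD secret)).drop (j + 1 - 4)).length == 4) = decide (4 ≤ j + 1) := by
      simp only [List.length_drop, List.length_map, List.length_range]
      by_cases h : 4 ≤ j + 1 <;> simp [h] <;> omega
    rw [List.range'_succ, List.filter_cons, hcond]
    by_cases h4 : 4 ≤ j + 1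
    · rw [if_pos (by simpa using h4), if_pos (by simpa using h4)]
      rw [List.map_cons, List.foldl_cons, ← pvWin_key secret (j + 1) h4]
      exact ih (j + 1) _
    · rw [if_neg (by simpa using h4), if_neg (by simpa using h4)]
      exact ih (j + 1) ans

lemma pvTake_range' (m s n : Nat) : (List.range' s n).take m = List.range' s (min m n) := by
  induction m generalizing s n with
  | zero => simp
  | succ m ih =>
    cases n with
    | zero => simp
    | succ n =>
      have hmin : min (m + 1) (n + 1) = min m n + 1 := by omega
      rw [List.range'_succ, List.take_succ_cons, ih, hmin, List.range'_succ]

lemma pvA_eq (secret length : Int) :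
    differences_to_price secret length
      = (((List.range' 4 ((length - 1).toNat - 3)).map
          (fun k => ((List.range' (k - 4) 4).map (pvD secret), pvP secret k))).foldl pvStep
          PySem.Dict.empty).items := by
  unfold differences_to_price
  dsimp only
  rw [pvDiffs_eq, pvPrices_eq]
  set n := (length - 1).toNat with hn
  have hlen : (((List.range (n + 1)).map (pvP secret)).length : Int) = ((n : Int)) + 1 := by simp
  rw [hlen]
  have hm : ((((n : Int)) + 1) - 4).toNat = n - 3 := by omega
  rw [PySem.List.pyRange_one, List.foldl_map]
  rw [hm]
  have hr : List.range' 4 (n - 3) = (List.range (n - 3)).map (fun k => 4 + k) := by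
    rw [List.range'_eq_map_range]
  rw [hr, List.map_map, List.foldl_map]
  congr 1
  apply PySem.List.foldl_congr_mem
  intro d k hk
  simp only [List.mem_range] at hk
  have hk4 : (4 : Int) + (k : Int) = ((k + 4 : Nat) : Int) := by omega
  have hk4' : (4 : Int) + (k : Int) - 4 = ((k : Nat) : Int) := by omega
  simp only [Function.comp]
  rw [hk4', hk4, PySem.List.slice_natCast, PySem.List.pyGetD_natCast]
  have hkey : (((List.range n).map (pvD secret)).drop k).take (k + 4 - k)
      = (List.range' k 4).map (pvD secret) := by
    rw [← List.map_drop, ← List.map_take, List.range_eq_range', pvDrop_range', pvTake_range']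
    have h1 : 0 + k = k := by omega
    have h2 : k + 4 - k = 4 := by omega
    have h3 : min 4 (n - k) = 4 := by omega
    rw [h1, h2, h3]
  rw [hkey]
  have hval : ((List.range (n + 1)).map (pvP secret)).getD (k + 4) 0 = pvP secret (k + 4) := by
    rw [List.getD_eq_getElem _ _ (by simpa using by omega)]
    simp
  rw [hval]
  have hkk : (4 : Nat) + k = k + 4 := by omega
  simp only [pvStep, hkk, Nat.add_sub_cancel]
  by_cases hc : d.contains ((List.range' k 4).map (pvD secret))
  · rw [if_pos hc, PySem.Dict.setdefault_of_contains _ _ hc]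
  · rw [if_neg (by simp [hc]), PySem.Dict.setdefault_of_not_contains _ _ (by simpa using hc)]

-- ===== VERDICT (by name: the statement is the Claim_ definition above) =====
theorem differences_to_price_spec : Claim_equal_differences_to_price := by
  intro secret length _
  unfold Spec_differences_to_price
  rw [pvA_eq]
  unfold differences_to_price_alt
  have h0 : pvAltLoop (length - 1).toNat secret (PySem.Int.mod secret 10) [] PySem.Dict.empty
      = pvAltLoop (length - 1).toNat (pvIter 0 secret) (pvP secret 0)
          (((List.range 0).map (pvD secret)).drop (0 - 4)) PySem.Dict.empty := rfl
  rw [h0, pvAltLoop_spec, pvFilter_range']
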